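-- pv_equiv track=rewrite | github.com/pypi-data/pypi-mirror-382 | packages/norvelang/norvelang-0.2.1-py3-none-any.whl/norve/interpreter/backend/column_utils.py | _find_dotted_key_match
-- ===== SOURCE A (Python) =====
-- from typing import List, Optional
--
-- def _find_dotted_key_match(requested: str, row_keys: List[str]) -> Optional[str]:
--     """Find best match for dotted keys (table.column format)."""
--     if "." not in requested:
--         return None
--
--     # Try exact match first
--     for k in row_keys:
--         if k == requested:
--             return k
--
--     req_prefix, req_col = requested.split(".", 1)
--
--     # Try various matching strategies
--     result = _try_dotted_key_strategies(req_prefix, req_col, row_keys)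
--     return result
--
-- def _try_dotted_key_strategies(
--     req_prefix: str, req_col: str, row_keys: List[str]
-- ) -> Optional[str]:
--     """Try different strategies for matching dotted keys."""
--     # Strategy 1: match keys that end with the requested column and have a similar prefix
--     matches = [
--         k
--         for k in row_keys
--         if k.endswith(f".{req_col}") and k.split(".", 1)[0].startswith(req_prefix)
--     ]
--     if len(matches) == 1:
--         return matches[0]
--
--     # Strategy 2: any key that ends with the column name
--     matches = [k for k in row_keys if k.endswith(f".{req_col}")]
--     if len(matches) == 1:
--         return matches[0]
--
--     # Strategy 3: try base column name
--     if req_col in row_keys: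
--         return req_col
--
--     # Strategy 4: case-insensitive match for base column
--     matches = [k for k in row_keys if k.lower() == req_col.lower()]
--     if len(matches) == 1:
--         return matches[0]
--
--     return None
-- ===== SOURCE B (Python) =====
-- from typing import List, Optional
--
-- def _find_dotted_key_match(requested: str, row_keys: List[str]) -> Optional[str]:
--     """Single pass over row_keys collecting all candidate sets, then one priority chain."""
--     if "." not in requested:
--         return None
--     req_prefix, req_col = requested.split(".", 1)
--     suffix = "." + req_col
--     rcl = req_col.lower()
--     exact = False
--     m1 = []  # ends with suffix and prefix matches
--     m2 = []  # ends with suffix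
--     base = False
--     m4 = []  # case-insensitive base-column match
--     for k in row_keys:
--         if k == requested:
--             exact = True
--         if k.endswith(suffix):
--             m2.append(k)
--             if k.split(".", 1)[0].startswith(req_prefix):
--                 m1.append(k)
--         if k == req_col:
--             base = True
--         if k.lower() == rcl:
--             m4.append(k)
--     if exact:
--         return requested
--     if len(m1) == 1:
--         return m1[0]
--     if len(m2) == 1:
--         return m2[0]
--     if base:
--         return req_col
--     if len(m4) == 1:
--         return m4[0]
--     return None
-- ===== Notes on version B (the rewrite author's own statement) =====
-- stated objective: alternative
-- what changed: Replaces four separate scans (exact-match loop plus three list-comprehension passes in a helper) with one inlined single pass that records all candidate lists and flags, followed by one priority chain.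
import Mathlib
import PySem

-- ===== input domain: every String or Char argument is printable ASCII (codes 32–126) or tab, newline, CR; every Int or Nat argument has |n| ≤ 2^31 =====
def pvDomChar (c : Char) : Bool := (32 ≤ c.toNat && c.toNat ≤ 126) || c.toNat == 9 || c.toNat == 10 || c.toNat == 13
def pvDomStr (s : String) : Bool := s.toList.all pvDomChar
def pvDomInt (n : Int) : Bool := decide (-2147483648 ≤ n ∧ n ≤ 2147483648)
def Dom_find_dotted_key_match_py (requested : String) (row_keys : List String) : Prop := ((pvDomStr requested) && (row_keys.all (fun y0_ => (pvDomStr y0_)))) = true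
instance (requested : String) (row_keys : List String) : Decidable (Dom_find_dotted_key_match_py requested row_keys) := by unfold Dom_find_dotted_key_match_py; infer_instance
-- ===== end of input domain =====

-- B fuses A's exact-match loop and three comprehension scans into one pass; same return value everywhere.

-- ===== PORT A =====
-- the 'for k in row_keys: if k == requested: return k' loop
def pvFindExact (requested : String) : List String → Option String
  | [] => none
  | k :: rest => if k == requested then some k else pvFindExact requested rest

-- port of _try_dotted_key_strategies
-- note: requested always contains ".", so split(".",1) has exactly 2 parts and
-- k.split(".",1) has ≥ 1 part; the .getD/.headD defaults are never reached.
def pvTryStrategies (req_prefix req_col : String) (row_keys : List String) : Option String :=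
  let m1 := row_keys.filter (fun k =>
    PySem.Str.endswith k ("." ++ req_col) &&
      PySem.Str.startswith (((PySem.Str.splitMax? k "." 1).getD []).headD "") req_prefix)
  if m1.length == 1 then PySem.List.pyGet? m1 0 else
  let m2 := row_keys.filter (fun k => PySem.Str.endswith k ("." ++ req_col))
  if m2.length == 1 then PySem.List.pyGet? m2 0 else
  if row_keys.contains req_col then some req_col else
  let m4 := row_keys.filter (fun k => PySem.Str.lower k == PySem.Str.lower req_col)
  if m4.length == 1 then PySem.List.pyGet? m4 0 else none

def find_dotted_key_match_py (requested : String) (row_keys : List String) : Option String :=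
  if !(PySem.Str.isIn "." requested) then none
  else
    match pvFindExact requested row_keys with
    | some k => some k
    | none =>
      let parts := (PySem.Str.splitMax? requested "." 1).getD []
      let req_prefix := parts.headD ""
      let req_col := (parts.drop 1).headD ""
      pvTryStrategies req_prefix req_col row_keys

-- ===== PORT B =====
-- one fold over row_keys carrying (exact, m1, m2, base, m4)
def pvScanStep (requested req_prefix req_col suffix rcl : String)
    (s : Bool × List String × List String × Bool × List String) (k : String) :
    Bool × List String × List String × Bool × List String :=
  let (e, m1, m2, b, m4) := s
  let e := if k == requested then true else e
  let (m2, m1) :=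
    if PySem.Str.endswith k suffix then
      (m2 ++ [k],
        if PySem.Str.startswith (((PySem.Str.splitMax? k "." 1).getD []).headD "") req_prefix
        then m1 ++ [k] else m1)
    else (m2, m1)
  let b := if k == req_col then true else b
  let m4 := if PySem.Str.lower k == rcl then m4 ++ [k] else m4
  (e, m1, m2, b, m4)

def find_dotted_key_match_py_alt (requested : String) (row_keys : List String) : Option String :=
  if !(PySem.Str.isIn "." requested) then none
  else
    let parts := (PySem.Str.splitMax? requested "." 1).getD []
    let req_prefix := parts.headD ""
    let req_col := (parts.drop 1).headD ""
    let suffix := "." ++ req_col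
    let rcl := PySem.Str.lower req_col
    let st := row_keys.foldl (pvScanStep requested req_prefix req_col suffix rcl)
      (false, [], [], false, [])
    let (e, m1, m2, b, m4) := st
    if e then some requested
    else if m1.length == 1 then m1.head?
    else if m2.length == 1 then m2.head?
    else if b then some req_col
    else if m4.length == 1 then m4.head?
    else none

-- ===== PRECONDITION & SPEC =====
def Spec_find_dotted_key_match_py (requested : String) (row_keys : List String) (out : Option String) : Prop := out = find_dotted_key_match_py_alt requested row_keys
instance (requested : String) (row_keys : List String) (out : Option String) : Decidable (Spec_find_dotted_key_match_py requested row_keys out) := by unfold Spec_find_dotted_key_match_py; infer_instance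

-- ===== CLAIM (what is proved, stated in full; the proofs are below) =====
def Claim_equal_find_dotted_key_match_py : Prop := ∀ (requested : String) (row_keys : List String), Dom_find_dotted_key_match_py requested row_keys → Spec_find_dotted_key_match_py requested row_keys (find_dotted_key_match_py requested row_keys)

-- ===== LEMMAS AND PROOFS =====

theorem pvScan_spec (requested req_prefix req_col suffix rcl : String) :
    ∀ (l : List String) (e : Bool) (m1 m2 : List String) (b : Bool) (m4 : List String),
      l.foldl (pvScanStep requested req_prefix req_col suffix rcl) (e, m1, m2, b, m4) =
        (e || l.any (· == requested),
         m1 ++ l.filter (fun k =>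
            PySem.Str.endswith k suffix &&
              PySem.Str.startswith (((PySem.Str.splitMax? k "." 1).getD []).headD "") req_prefix),
         m2 ++ l.filter (fun k => PySem.Str.endswith k suffix),
         b || l.any (· == req_col),
         m4 ++ l.filter (fun k => PySem.Str.lower k == rcl)) := by
  intro l
  induction l with
  | nil => intro e m1 m2 b m4; simp
  | cons k rest ih =>
    intro e m1 m2 b m4
    simp only [List.foldl_cons, List.any_cons, List.filter_cons, pvScanStep]
    rw [ih]
    by_cases h1 : (k == requested) = true <;>
      by_cases h2 : PySem.Chars.endswith k.toList suffix.toList = true <;>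
      by_cases h3 : PySem.Chars.startswith (((PySem.Str.splitMax? k "." 1).getD []).head?.getD "").toList req_prefix.toList = true <;>
      by_cases h4 : (k == req_col) = true <;>
      by_cases h5 : (PySem.Str.lower k == rcl) = true <;>
      simp [h1, h2, h3, h4, h5]

theorem pvFindExact_spec (requested : String) (l : List String) :
    pvFindExact requested l = if l.any (· == requested) then some requested else none := by
  induction l with
  | nil => simp [pvFindExact]
  | cons k rest ih =>
    by_cases h : (k == requested) = true
    · have : k = requested := by simpa using h
      simp [pvFindExact, this]
    · simp [pvFindExact, h, ih]

theorem pvGet0_eq_head? (m : List String) :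
    PySem.List.pyGet? m 0 = m.head? := by
  match m with
  | [] => simp [PySem.List.pyGet?, PySem.List.pyIdx?]
  | x :: rest => simp [PySem.List.pyGet?, PySem.List.pyIdx?]

theorem pvContains_eq_any (l : List String) (a : String) :
    l.contains a = l.any (· == a) := (List.any_beq' (l := l) (a := a)).symm

-- core equality once "." ∈ requested and the split parts are abstracted
theorem pvCore (requested req_prefix req_col : String) (row_keys : List String) :
    (match pvFindExact requested row_keys with
     | some k => some k
     | none => pvTryStrategies req_prefix req_col row_keys) =
    (let st := row_keys.foldl
        (pvScanStep requested req_prefix req_col ("." ++ req_col) (PySem.Str.lower req_col))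
        (false, [], [], false, [])
     let (e, m1, m2, b, m4) := st
     if e then some requested
     else if m1.length == 1 then m1.head?
     else if m2.length == 1 then m2.head?
     else if b then some req_col
     else if m4.length == 1 then m4.head?
     else none) := by
  rw [pvFindExact_spec, pvScan_spec]
  by_cases hex : row_keys.any (· == requested) = true
  · simp [hex]
  · simp only [hex, Bool.false_or]
    unfold pvTryStrategies
    rw [pvContains_eq_any]
    simp only [pvGet0_eq_head?, Bool.false_eq_true, if_false, List.nil_append]

-- ===== VERDICT (by name: the statement is the Claim_ definition above) =====
theorem find_dotted_key_match_py_spec : Claim_equal_find_dotted_key_match_py := by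
  intro requested row_keys _
  unfold Spec_find_dotted_key_match_py
  unfold find_dotted_key_match_py find_dotted_key_match_py_alt
  by_cases hin : PySem.Chars.isIn ['.'] requested.toList = true
  · simp only [PySem.Str.isIn_eq]
    rw [show (".".toList) = ['.'] from rfl, hin]
    simp only [Bool.not_true, Bool.false_eq_true, if_false]
    exact pvCore requested _ _ row_keys
  · simp only [PySem.Str.isIn_eq]
    rw [show (".".toList) = ['.'] from rfl, Bool.not_eq_true] at *
    rw [hin]
    simp
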